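/- GENERATED by mk_final_copies.py from the proof of the farm's unit `vorbis_decode_packet_rest.2b` (farm:vorbis_decode_packet_rest.2b.1: Lemmas.lean) as the
   re-elaboration sweep compiled it — do not edit. -/
import Asan.CheckWalk
import Vorbis.Spec.PacketRestFrame
import Vorbis.Spec.Reader
import Vorbis.Spec.Units.vorbis_decode_packet_rest_2b

/-!
  UNIT vorbis_decode_packet_rest.2b — segment .2b of `vorbis_decode_packet_rest` (0x111393–0x1113fe; stb_vorbis_fixed.c 3233–3240):

      0x111393  test eax, eax ; je 0x1112b5                the bit `get_bits(f, 1)` was 0: exit `At7a` (no store since the cut)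
      0x11139b  range = range_list[g->floor1_multiplier - 1]  (two check sites; spilled to `[rsp + 0x4c]`)
      0x1113cc  finalY = f->finalY[i]                       (one check site; r12, spilled to `[rsp + 0x20]`)
      0x1113ef  ilog(range)                                 returns into 0x1113f8 (`cut18`): the intermediate assertion `seg2b_AtIlog`
      0x1113f8  get_bits(f, ilog(range) - 1)                returns into 0x111403 (`cut19`): exit `At2c`

  Two lemmas, one per returned callee state: `seg2b_first` (cut17 → `At7a` ∨ `seg2b_AtIlog`), `seg2b_second` (`seg2b_AtIlog` → `At2c`).
-/

open X86 X86.User Asan Vorbis Vorbis.Spec Vorbis.Spec.vorbis_decode_packet_rest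

namespace Vorbis.Spec.vorbis_decode_packet_rest_2b

variable {others : List Obj} {frames : List (Nat × FrameLayout)} {len : Nat} {Ar : Arena} {stored room : Int}
  {ysz : Nat → Nat}

/-! ### Closed bit-level facts -/

/-- `movzx ebx, byte ; sub ebx, 1 ; movsxd rbx, ebx` of a multiplier `1 ≤ M ≤ 4` (FL7): the index `M − 1`. -/
theorem seg2b_mult_idx (M : Nat) (h1 : 1 ≤ M) (h4 : M ≤ 4) :
    Word.ofBV (BitVec.signExtend 64 (BitVec.zeroExtend 32 (BitVec.ofNat 8 M) - 1#32)) = UInt64.ofNat (M - 1) := by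
  have h : ∀ j : Fin 4, Word.ofBV (BitVec.signExtend 64 (BitVec.zeroExtend 32 (BitVec.ofNat 8 (j.val + 1)) - 1#32))
      = UInt64.ofNat j.val := by
    decide
  have h' := h ⟨M - 1, by omega⟩
  have e : M - 1 + 1 = M := by omega
  simp only [e] at h'
  exact h'

/-- `movsxd rbx, r14d ; add rbx, 0x9e ; lea rdi, [rbp + rbx*8]` for a channel index `i < 16`: the offset `1264 + 8 i` of
`f->finalY[i]`. -/
theorem seg2b_fy_off (i : Nat) (hi : i < 16) : (UInt64.ofNat i + 158) * 8 = UInt64.ofNat (1264 + 8 * i) := by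
  have h : ∀ j : Fin 16, (UInt64.ofNat j.val + 158) * 8 = UInt64.ofNat (1264 + 8 * j.val) := by
    decide
  exact h ⟨i, hi⟩

/-- `ilog(range)` for the four entries of `range_list`, on the register form the walker has for `mov edi, [rsp + 0x4c]`:
9, 8, 7, 7. -/
theorem seg2b_ilog_val (Rg : Nat) (h : Rg = 256 ∨ Rg = 128 ∨ Rg = 86 ∨ Rg = 64) :
    ilogVal (Word.part Width.w32 (Word.ofBV (BitVec.ofNat 32 ((BitVec.ofNat 32 Rg).toNat % 4294967296)))).toInt = 9 ∨
    ilogVal (Word.part Width.w32 (Word.ofBV (BitVec.ofNat 32 ((BitVec.ofNat 32 Rg).toNat % 4294967296)))).toInt = 8 ∨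
    ilogVal (Word.part Width.w32 (Word.ofBV (BitVec.ofNat 32 ((BitVec.ofNat 32 Rg).toNat % 4294967296)))).toInt = 7 := by
  rcases h with rfl | rfl | rfl | rfl
  · exact Or.inl (by decide)
  · exact Or.inr (Or.inl (by decide))
  · exact Or.inr (Or.inr (by decide))
  · exact Or.inr (Or.inr (by decide))

/-- The address of `range_list[k]`, `k < 4`, as the walker has it (`lea rdi, [rbx*4 + 0x120600]`). -/
theorem seg2b_range_addr (k : Nat) (hk : k < 4) :
    UInt64.ofNat k * 4 + 1181184 = addr (Vorbis.Globals.range_list.beg + 4 * k) := by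
  have h : ∀ j : Fin 4, UInt64.ofNat j.val * 4 + 1181184 = addr (Vorbis.Globals.range_list.beg + 4 * j.val) := by
    decide
  exact h ⟨k, hk⟩

/-- `lea esi, [rax - 1]` of `ilog(range)` ∈ {9, 8, 7}: the bit count of `get_bits` is at most 32. -/
theorem seg2b_bits_arg (z : Word) (hz : z = 9 ∨ z = 8 ∨ z = 7) :
    (Word.ofBV (BitVec.setWidth 32 (z - 1).toBitVec)).toNat % 2 ^ 32 ≤ 32 := by
  rcases hz with rfl | rfl | rfl <;> decide

/-- The slot `[steady rsp + 0x40]` as the walker spells it. -/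
theorem seg2b_slot40 (r : Word) : r - 2936 = r - 3000 + 0x40 := by
  bv_decide

/-- The slot `[steady rsp + 0x20]` as the walker spells it. -/
theorem seg2b_slot20 (r : Word) : r - 3000 + 0x20 = r - 2968 := by
  bv_decide

/-- The slot `[steady rsp + 0x4c]` as the walker spells it. -/
theorem seg2b_slot4c (r : Word) : r - 3000 + 0x4c = r - 2924 := by
  bv_decide

/-! ### The intermediate assertion -/

/-- **Cut 0x1113f8 (`cut18`): the return of `ilog(range)`** (line 3240), channel `i`: what `At2c` says, and `rax = ilog(range)` ∈
{9, 8, 7} (SH7). The registers are the callee-saved ones; `rbp` is stated as a word (the walker's rewrite rule). -/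
structure seg2b_AtIlog (u₀ : State) (others : List Obj) (frames : List (Nat × FrameLayout)) (len : Nat) (Ar : Arena)
    (stored room : Int) (mode : Nat) (ysz : Nat → Nat) (u : State) (ret : Word)
    (i : Nat) (v : State) : Prop
    extends Stable u₀ others frames len Ar stored room mode ysz u ret (lsOf u) v where
  /-- the return address of the call at 0x1113f3 -/
  rip : v.rip = Vorbis.L.vorbis_decode_packet_rest.cut18
  /-- the channel index -/
  r14 : v.reg .r14 = UInt64.ofNat i
  /-- `i < f->channels` -/
  i_lt : (i : Int) < stb_vorbis.channels v.mem (fOf u)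
  /-- `r13 = map` -/
  r13 : (v.reg .r13).toNat = mapOf v.mem (fOf u) (mOf u)
  /-- `r15 = g`, the Floor1 record of channel `i` -/
  g : IsFloor v.mem (fOf u) (v.reg .r15).toNat
  /-- `rbp = f` (0x1113d6) -/
  rbp : v.reg .rbp = u.reg .rdi
  /-- `r12 = finalY = f->finalY[i]` (0x1113e5) -/
  r12 : (v.reg .r12).toNat = stb_vorbis.finalY v.mem (fOf u) i
  /-- the spill of `finalY` (0x1113ea) -/
  slot_finalY : v.mem.readLE (u.reg .rsp - 2968) 8 = stb_vorbis.finalY v.mem (fOf u) i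
  /-- the spill of `range` (0x1113c8): one of the four entries of `range_list` -/
  slot_range : v.mem.readLE (u.reg .rsp - 2924) 4 = 256 ∨ v.mem.readLE (u.reg .rsp - 2924) 4 = 128 ∨
    v.mem.readLE (u.reg .rsp - 2924) 4 = 86 ∨ v.mem.readLE (u.reg .rsp - 2924) 4 = 64
  /-- `rax = ilog(range)` -/
  rax : v.reg .rax = 9 ∨ v.reg .rax = 8 ∨ v.reg .rax = 7

/-! ### 0x111393 … 0x1113f3 and the return of ilog -/

set_option maxRecDepth 8000 in
set_option maxHeartbeats 16000000 in
/-- **The first part of segment .2b** (0x111393 … 0x1113f3, lines 3233–3240): the bit was 0 → the exit `At7a` (0x1112b5) with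
the memory of the cut; otherwise the three check sites (`g->floor1_multiplier`: a field of the floor record, FL2; `range_list[mult − 1]`:
the global, FL7 and SH5; `f->finalY[i]`: a field of `*f`), the two spills, and `ilog(range)` returns into 0x1113f8 with
`seg2b_AtIlog` (STABLE by `Stable.carry` over the scratch stores `[0x20]`, `[0x4c]` and the callees' stack window). -/
theorem seg2b_first {Lay : Layout} (hLay : Lay.hi = 0x1000000) {μ : Microarch} (hμ : UserX.MicroOK μ) {u₀ : State}
    (hcode : HasCodeNat Lay u₀ Vorbis.L.vorbis_decode_packet_rest.entry Vorbis.Code.code_vorbis_decode_packet_rest.nat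
      Vorbis.L.vorbis_decode_packet_rest.size)
    (hload4 : Asan.SmallCheck Lay μ Vorbis.WayInv (Vorbis.CodeOK u₀) [.rax, .rcx, .rdx] 4 Vorbis.L.__asan_load4_noabort.entry)
    (hload8 : Asan.SmallCheck Lay μ Vorbis.WayInv (Vorbis.CodeOK u₀) [.rax, .rcx, .rdx] 8 Vorbis.L.__asan_load8_noabort.entry)
    (hload1 : Asan.SmallCheck Lay μ Vorbis.WayInv (Vorbis.CodeOK u₀) [.rax, .rdx] 1 Vorbis.L.__asan_load1_noabort.entry)
    {mode : Nat} {e v : State} {ret : Word} {i : Nat}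
    (hilog : Calls Lay μ Vorbis.WayInv (Vorbis.conv u₀) Vorbis.L.ilog.entry (Vorbis.Spec.ilog.spec others (framesIn frames e)))
    (hat : At2b u₀ others frames len Ar stored room mode ysz e ret i v) :
    ReachVia Lay μ Vorbis.WayInv v (fun w => At7a u₀ others frames len Ar stored room mode ysz e ret i w ∨
      seg2b_AtIlog u₀ others frames len Ar stored room mode ysz e ret i w) := by
  -- 1. the ENTRY state's facts
  have he := hat.entry
  v_entry he
  -- 2. the present state
  have w_rip := hat.rip
  have c_rsp : v.reg .rsp = e.reg .rsp - 3000 := hat.rsp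
  have c_r14 : v.reg .r14 = UInt64.ofNat i := hat.r14
  have c_rbx : v.reg .rbx = v.reg .r15 := hat.rbx
  have w_kept : RegsKept [.rsp] v v := RegsKept.refl _ _
  have w_eq : Mem.EqOn Vorbis.L.textLo Vorbis.L.textHi u₀.mem v.mem := hat.code
  have hdf : v.flags .df = false := (show abiInv _ from hat.abi).1
  have hmx : v.mxcsr &&& 0x1F80 = 0x1F80 := (show abiInv _ from hat.abi).2
  have hsse := Vorbis.sseOK_of_abiInv hat.abi
  -- 3. the slot `[rsp + 0x40] = f`
  have k_f : v.mem.readLE (e.reg .rsp - 2936) 8 = (e.reg .rdi).toNat := by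
    rw [seg2b_slot40]
    exact hat.slot_f
  have hinv := hat.inv
  have hvok := hinv.fb.vorbis
  have hL := hinv.live
  obtain ⟨hfoff0, hfin0⟩ := SpanOK.geom_obj hinv he_top
  have hfoff : (e.reg .rdi).toNat + 1808 ≤ 0x700000 ∨ 0x800020 ≤ (e.reg .rdi).toNat := hfoff0
  have hfin : (e.reg .rdi).toNat + 1808 ≤ 0xC00000 := hfin0
  have hsh := hat.shadow
  have hm : fOf e + 484 ≤ mOf e ∧ mOf e + 6 ≤ fOf e + 868 := mode_record_inside hat.pre
  -- HD1: at most 16 channels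
  have hC16 : stb_vorbis.channels v.mem (fOf e) ≤ 16 := hinv.config.header.HD1.2
  have hilt := hat.i_lt
  have hi16 : i < 16 := by omega
  -- the floor record `g`: inside the floor block (FL2), off the stack region
  have hfl := hvok.floor
  have hgfl : IsFloor v.mem (fOf e) (v.reg .r15).toNat := hat.g
  have hgin := hfl.toFloorShape.elem_inside hgfl hinv.ok
  have hgblk := hfl.toFloorShape.elem_in hgfl (off := 0) (n := 1596) (by simp only [voff]; omega)
  have hgoff := hinv.offStack _ hfl.FL2
  simp only [vblock, voff, Block.contains, Nat.add_zero] at hgin hgblk hgoff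
  have hg1 : 0x100000 ≤ (v.reg .r15).toNat := hgin.1
  have hg2 : (v.reg .r15).toNat + 1596 ≤ 0xC00000 := hgin.2
  have hg3 : (v.reg .r15).toNat + 1596 ≤ 0x700000 ∨ 0x800000 ≤ (v.reg .r15).toNat := by
    omega
  clear hgin hgblk hgoff
  -- the multiplier: FL7
  obtain ⟨M, hM⟩ : ∃ M : Nat, v.mem.readLE (v.reg .r15 + 1588) 1 = M := ⟨_, rfl⟩
  have hM14 : 1 ≤ M ∧ M ≤ 4 := by
    obtain ⟨idx, hidx, hgeq⟩ := hgfl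
    have h7 := (hfl.floors idx hidx).FL7
    rw [← hgeq] at h7
    have ea : addr ((v.reg .r15).toNat + 1588) = v.reg .r15 + 1588 := by
      rw [← addr_add_lit, addr_toNat]
    have hv : Floor1.floor1_multiplier v.mem (v.reg .r15).toNat = M := by
      rw [← hM, ← ea]
      rfl
    rw [hv] at h7
    exact h7
  have hMidx := seg2b_mult_idx M hM14.1 hM14.2
  -- `range = range_list[mult - 1]`: SH7
  obtain ⟨Rg, hRg⟩ : ∃ Rg : Nat, v.mem.readLE (UInt64.ofNat (M - 1) * 4 + 1181184) 4 = Rg := ⟨_, rfl⟩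
  have hRglt : Rg < 2 ^ 32 := by
    rw [← hRg]
    exact Mem.readLE_lt' _ _ 4
  have hRgv : Rg = 256 ∨ Rg = 128 ∨ Rg = 86 ∨ Rg = 64 := by
    have hval := RangeListOK.value hinv.consts.range hM14
    have e1 : v.mem.i32 (Vorbis.Globals.range_list.beg + 4 * (M - 1)) = sint32 Rg := by
      rw [← hRg, seg2b_range_addr (M - 1) (by omega)]
      rfl
    rw [e1] at hval
    have hc := sint32_cases Rg
    omega
  -- `finalY = f->finalY[i]`
  obtain ⟨FY, hFY⟩ : ∃ FY : Nat, v.mem.readLE (e.reg .rdi + (UInt64.ofNat i + 158) * 8) 8 = FY := ⟨_, rfl⟩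
  have hFYlt : FY < 2 ^ 64 := by
    rw [← hFY]
    exact Mem.readLE_lt' _ _ 8
  have hFYv : stb_vorbis.finalY v.mem (fOf e) i = FY := by
    rw [← hFY, seg2b_fy_off i hi16]
    have ea : addr ((e.reg .rdi).toNat + 1264 + 8 * i) = e.reg .rdi + UInt64.ofNat (1264 + 8 * i) := by
      rw [Nat.add_assoc]
      unfold addr
      rw [UInt64.ofNat_add, UInt64.ofNat_toNat]
    rw [← ea]
    rfl
  have hsx := cnt32_sext i (by omega)
  -- 4. 0x111393 … 0x1113f3 (lines 3233–3240)
  u_walk hcode [hμ.vendor, hMidx, hsx] until [Vorbis.L.vorbis_decode_packet_rest.cut14, Vorbis.L.vorbis_decode_packet_rest.cut18] span [Vorbis.L.textLo, Vorbis.L.textHi] side (v_side)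
  · -- 0x1113a2, load1 `g->floor1_multiplier` (line 3237): a field of the floor record
    have hun : ShadowUntouched v.mem s_1113a2.mem := by v_untouched
    have hs := hfl.toFloorShape.site_elem hL hgfl 1588 1 (by simp only [voff]; omega) (by omega) rfl
    exact Vorbis.Spec.check_site hsh hun hs (by u_omega)
  · -- 0x1113bc, load4 `range_list[mult - 1]` (line 3237): the global, `mult - 1 < 4`
    have hun : ShadowUntouched v.mem s_1113bc.mem := by v_untouched
    refine Vorbis.check_small_other hsh hun hinv.g_range (by decide) ?_ ?_
    · show 0x120600 ≤ _
      u_omega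
    · show _ ≤ 0x120600 + 16
      u_omega
  · -- 0x1113e0, load8 `f->finalY[i]` (line 3239): a field of `*f`
    have hun : ShadowUntouched v.mem s_1113e0.mem := by v_untouched
    have hs := hvok.bits.site_field hL (1264 + 8 * i) 8 (by omega) (by omega) rfl
    refine Vorbis.Spec.check_site hsh hun hs ?_
    rw [seg2b_fy_off i hi16, toNat_add_ofNat _ _ (by omega)]
  · v_inv
  · -- 0x1113f3: ilog's precondition: the shadow layer at the callee's entry, `log2_4` a live global
    have hun : ShadowUntouched v.mem s_1113f3.mem := by v_untouched
    have etop : (s_1113f3.reg .rsp).toNat + 8 = (spOf e).toNat := by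
      rw [w_rsp]
      u_omega
    refine ⟨⟨?_, hat.pre.1.offText⟩, hinv.g_log2⟩
    rw [etop]
    exact hsh.untouched hun
  · -- 0x111395 taken: the bit was 0, the exit to segment .7 (entry A, 0x1112b5); no store since the cut
    refine ReachVia.done (Or.inl ?_)
    have habi : abiInv s_111395 := by v_inv
    have hst := Stable.same_mem hat.toStable w_mem w_rsp habi
    refine ⟨hst, w_rip, ?_, ?_, ?_⟩
    · rw [w_kept .r14 rfl]
      exact c_r14
    · rw [w_mem]
      exact hilt
    · rw [w_mem, w_kept .r13 rfl]
      exact hat.r13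
  · -- 0x1113f8, after the call of ilog
    v_after_call w_rsp_1113f3 w_mem_1113f3
    obtain ⟨hpun, hpneg, hpval⟩ := w_post
    -- SH7 in the memory at ilog's entry: scratch stores only since the cut
    have hlog : Log2_4In s_1113f3.mem := by
      intro j hj
      have h0 := hinv.consts.log2 j hj
      simp only [Vorbis.Globals.log2_4] at h0 ⊢
      rw [w_mem_1113f3]
      u_frame h0
    have hrax := hpval hlog
    rw [w_rdi_1113f3] at hrax
    have hz : s_1113f3r.reg .rax = 9 ∨ s_1113f3r.reg .rax = 8 ∨ s_1113f3r.reg .rax = 7 := by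
      rcases seg2b_ilog_val Rg hRgv with h | h | h
      · rw [h] at hrax
        exact Or.inl (UInt64.toNat_inj.mp hrax)
      · rw [h] at hrax
        exact Or.inr (Or.inl (UInt64.toNat_inj.mp hrax))
      · rw [h] at hrax
        exact Or.inr (Or.inr (UInt64.toNat_inj.mp hrax))
    clear hrax hpval hpneg hlog
    -- the two spills, read in the memory after ilog
    have q_fy0 : s_1113f3.mem.readLE (e.reg .rsp - 2968) 8 = (UInt64.ofNat FY).toNat := by
      rw [w_mem_1113f3]
      u_read
    have q_rg0 : s_1113f3.mem.readLE (e.reg .rsp - 2924) 4 = (BitVec.ofNat 32 Rg).toNat := by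
      rw [w_mem_1113f3]
      u_read
    rw [w_mem_1113f3] at q_fy0 q_rg0
    have q_fy1 : s_1113f3r.mem.readLE (e.reg .rsp - 2968) 8 = (UInt64.ofNat FY).toNat := by
      u_frame q_fy0
    have q_rg1 : s_1113f3r.mem.readLE (e.reg .rsp - 2924) 4 = (BitVec.ofNat 32 Rg).toNat := by
      u_frame q_rg0
    -- STABLE after ilog: scratch stores only
    have hs1 : Mem.SameExcept [⟨(e.reg .rsp).toNat - 3856, (e.reg .rsp).toNat - 3000⟩,
        ⟨(e.reg .rsp).toNat - 2968, (e.reg .rsp).toNat - 2960⟩,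
        ⟨(e.reg .rsp).toNat - 2924, (e.reg .rsp).toNat - 2920⟩] v.mem s_1113f3r.mem := by
      u_same
    have hun1 : ShadowUntouched v.mem s_1113f3r.mem := by v_untouched
    have hsp1 : ∀ w, w ∈ [(⟨(e.reg .rsp).toNat - 3856, (e.reg .rsp).toNat - 3000⟩ : Span),
        ⟨(e.reg .rsp).toNat - 2968, (e.reg .rsp).toNat - 2960⟩,
        ⟨(e.reg .rsp).toNat - 2924, (e.reg .rsp).toNat - 2920⟩] →
        SpanOK ysz v.mem (e.reg .rsp).toNat (fOf e) w := by
      intro w hw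
      simp only [List.mem_cons, List.mem_nil_iff, or_false] at hw
      rcases hw with rfl | rfl | rfl
      · exact SpanOK.below (by simp only []; omega) (by simp only []; omega)
      · exact SpanOK.below (by simp only []; omega) (by simp only []; omega)
      · exact Or.inl ⟨by simp only []; omega, by simp only []; omega,
          Or.inr (Or.inl ⟨by simp only []; omega, by simp only []; omega⟩)⟩
    have hobj : (objBlock (fOf e)).Same v.mem s_1113f3r.mem := by
      apply hs1.eqOn
      intro w hw
      simp only [List.mem_cons, List.mem_nil_iff, or_false] at hw
      rcases hw with rfl | rfl | rfl <;> simp only [vblock, voff] <;> omega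
    have hbits : Bits (RunBlk Ar len) len s_1113f3r.mem (fOf e) :=
      hvok.bits.frame_fields (Bits.SameFields.of_same hobj)
    have habi : abiInv s_1113f3r := by v_inv
    have hst := Stable.carry hat.toStable hs1 hsp1 hun1 w_rsp w_eq habi hbits
    obtain ⟨ech, emode, efy, efloor⟩ := config_carry hinv he_room he_top hs1 hsp1
    refine ReachVia.done (Or.inr ?_)
    have hfyN : (UInt64.ofNat FY).toNat = stb_vorbis.finalY s_1113f3r.mem (fOf e) i := by
      rw [efy i hi16, hFYv, UInt64.toNat_ofNat']
      omega
    have hrgN : (BitVec.ofNat 32 Rg).toNat = Rg := toNat_ofNat32 Rg hRglt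
    refine { toStable := hst, rip := w_rip, r14 := ?_, i_lt := ?_, r13 := ?_, g := ?_, rbp := w_rbp, r12 := ?_,
             slot_finalY := ?_, slot_range := ?_, rax := hz }
    · rw [w_kept .r14 rfl]
      exact c_r14
    · rw [ech]
      exact hilt
    · rw [w_kept .r13 rfl, (emode (mOf e) hm.1 hm.2).2]
      exact hat.r13
    · rw [w_kept .r15 rfl]
      exact efloor _ hat.g
    · rw [w_r12]
      exact hfyN
    · rw [q_fy1]
      exact hfyN
    · rw [q_rg1, hrgN]
      exact hRgv

/-! ### 0x1113f8 … 0x1113fe and the return of get_bits -/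

set_option maxRecDepth 8000 in
set_option maxHeartbeats 16000000 in
/-- **The second part of segment .2b** (0x1113f8 … 0x1113fe, line 3240): `get_bits(f, ilog(range) − 1)` with `ilog(range) − 1` ∈
{8, 7, 6} ≤ 32; it returns into 0x111403 (`cut19`) with `At2c`: STABLE by `Stable.carry` over the callee's stack window and the
bit reader's windows of `*f`, `Bits` from the callee's post. -/
theorem seg2b_second {Lay : Layout} (hLay : Lay.hi = 0x1000000) {μ : Microarch} (hμ : UserX.MicroOK μ) {u₀ : State}
    (hcode : HasCodeNat Lay u₀ Vorbis.L.vorbis_decode_packet_rest.entry Vorbis.Code.code_vorbis_decode_packet_rest.nat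
      Vorbis.L.vorbis_decode_packet_rest.size)
    {mode : Nat} {e v : State} {ret : Word} {i : Nat}
    (hgb : Calls Lay μ Vorbis.WayInv (Vorbis.conv u₀) Vorbis.L.get_bits.entry
      (Vorbis.Spec.get_bits.spec others (framesIn frames e) (RunBlk Ar len) len))
    (hat : seg2b_AtIlog u₀ others frames len Ar stored room mode ysz e ret i v) :
    ReachVia Lay μ Vorbis.WayInv v (fun w => At2c u₀ others frames len Ar stored room mode ysz e ret i w) := by
  -- 1. the ENTRY state's facts
  have he := hat.entry
  v_entry he
  -- 2. the present state
  have w_rip := hat.rip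
  have c_rsp : v.reg .rsp = e.reg .rsp - 3000 := hat.rsp
  have c_rbp : v.reg .rbp = e.reg .rdi := hat.rbp
  obtain ⟨z, c_rax⟩ : ∃ z, v.reg .rax = z := ⟨_, rfl⟩
  have hz : z = 9 ∨ z = 8 ∨ z = 7 := by
    rw [← c_rax]
    exact hat.rax
  have w_kept : RegsKept [.rsp] v v := RegsKept.refl _ _
  have w_eq : Mem.EqOn Vorbis.L.textLo Vorbis.L.textHi u₀.mem v.mem := hat.code
  have hdf : v.flags .df = false := (show abiInv _ from hat.abi).1
  have hmx : v.mxcsr &&& 0x1F80 = 0x1F80 := (show abiInv _ from hat.abi).2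
  have hsse := Vorbis.sseOK_of_abiInv hat.abi
  have hinv := hat.inv
  have hvok := hinv.fb.vorbis
  obtain ⟨hfoff0, hfin0⟩ := SpanOK.geom_obj hinv he_top
  have hfoff : (e.reg .rdi).toNat + 1808 ≤ 0x700000 ∨ 0x800020 ≤ (e.reg .rdi).toNat := hfoff0
  have hfin : (e.reg .rdi).toNat + 1808 ≤ 0xC00000 := hfin0
  have hsh := hat.shadow
  have hm : fOf e + 484 ≤ mOf e ∧ mOf e + 6 ≤ fOf e + 868 := mode_record_inside hat.pre
  have hC16 : stb_vorbis.channels v.mem (fOf e) ≤ 16 := hinv.config.header.HD1.2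
  have hilt := hat.i_lt
  have hi16 : i < 16 := by omega
  -- 3. the two spills
  have k_fy := hat.slot_finalY
  have k_rg := hat.slot_range
  -- 4. 0x1113f8 … 0x1113fe (line 3240)
  u_walk hcode [hμ.vendor] until [Vorbis.L.vorbis_decode_packet_rest.cut19] span [Vorbis.L.textLo, Vorbis.L.textHi] side (v_side)
  · v_inv
  · -- 0x1113fe: get_bits's precondition
    have hun : ShadowUntouched v.mem s_1113fe.mem := by v_untouched
    have etop : (s_1113fe.reg .rsp).toNat + 8 = (spOf e).toNat := by
      rw [w_rsp]
      u_omega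
    have hs0 : Mem.SameExcept [⟨(e.reg .rsp).toNat - 3008, (e.reg .rsp).toNat - 3000⟩] v.mem s_1113fe.mem := by
      u_same
    have hobj : (objBlock (fOf e)).Same v.mem s_1113fe.mem := by
      apply hs0.eqOn
      intro w hw
      rw [List.mem_singleton.mp hw]
      simp only [vblock, voff]
      omega
    have hbits : Bits (RunBlk Ar len) len s_1113fe.mem (fOf e) :=
      hvok.bits.frame_fields (Bits.SameFields.of_same hobj)
    refine ⟨⟨⟨?_, hat.pre.1.offText⟩, ?_, ?_⟩, ?_⟩
    · rw [etop]
      exact hsh.untouched hun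
    · rw [w_rdi]
      exact hinv.readerEnv
    · rw [w_rdi]
      exact hbits
    · unfold bitsArg
      rw [w_rsi]
      exact seg2b_bits_arg z hz
  · -- 0x111403 (cut19), after the call of get_bits
    v_after_call w_rsp_1113fe w_mem_1113fe
    simp only [w_rdi_1113fe] at w_same
    have hpost := w_post
    -- the two spills through the callee's footprint
    have q_fy : s_1113fer.mem.readLE (e.reg .rsp - 2968) 8 = stb_vorbis.finalY v.mem (fOf e) i := by
      u_frame k_fy
    have q_rg : s_1113fer.mem.readLE (e.reg .rsp - 2924) 4 = v.mem.readLE (e.reg .rsp - 2924) 4 := by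
      u_frame (rfl : v.mem.readLE (e.reg .rsp - 2924) 4 = _)
    -- STABLE after get_bits: the callee's stack window and the bit reader's windows of `*f`
    have hs : Mem.SameExcept [⟨(e.reg .rsp).toNat - 3856, (e.reg .rsp).toNat - 3000⟩,
        ⟨(e.reg .rdi).toNat + 48, (e.reg .rdi).toNat + 56⟩, ⟨(e.reg .rdi).toNat + 84, (e.reg .rdi).toNat + 96⟩,
        ⟨(e.reg .rdi).toNat + 136, (e.reg .rdi).toNat + 144⟩, ⟨(e.reg .rdi).toNat + 1484, (e.reg .rdi).toNat + 1749⟩,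
        ⟨(e.reg .rdi).toNat + 1752, (e.reg .rdi).toNat + 1784⟩] v.mem s_1113fer.mem := by
      u_same
    have hun : ShadowUntouched v.mem s_1113fer.mem := by v_untouched
    have hsp : ∀ w, w ∈ [(⟨(e.reg .rsp).toNat - 3856, (e.reg .rsp).toNat - 3000⟩ : Span),
        ⟨(e.reg .rdi).toNat + 48, (e.reg .rdi).toNat + 56⟩, ⟨(e.reg .rdi).toNat + 84, (e.reg .rdi).toNat + 96⟩,
        ⟨(e.reg .rdi).toNat + 136, (e.reg .rdi).toNat + 144⟩, ⟨(e.reg .rdi).toNat + 1484, (e.reg .rdi).toNat + 1749⟩,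
        ⟨(e.reg .rdi).toNat + 1752, (e.reg .rdi).toNat + 1784⟩] →
        SpanOK ysz v.mem (e.reg .rsp).toNat (fOf e) w := by
      intro w hw
      rcases List.mem_cons.mp hw with rfl | hw'
      · exact SpanOK.below (by simp only []; omega) (by simp only []; omega)
      · exact SpanOK.of_winsBits hw'
    -- `Bits` of the new memory: the callee's post
    have hp : GetBitsSpecPost (RunBlk Ar len) len (s_1113fe.reg .rdi).toNat (bitsArg s_1113fe) s_1113fe s_1113fer := hpost
    have hbits : Bits (RunBlk Ar len) len s_1113fer.mem (fOf e) := by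
      have hb := hp.bits.bits
      rw [w_rdi_1113fe] at hb
      exact hb
    have habi : abiInv s_1113fer := by v_inv
    have hst := Stable.carry hat.toStable hs hsp hun w_rsp w_eq habi hbits
    obtain ⟨ech, emode, efy, efloor⟩ := config_carry hinv he_room he_top hs hsp
    refine ReachVia.done ?_
    refine { toStable := hst, rip := w_rip, r14 := ?_, i_lt := ?_, r13 := ?_, g := ?_, rbp := ?_, r12 := ?_,
             slot_finalY := ?_, slot_range := ?_ }
    · rw [w_kept .r14 rfl]
      exact hat.r14
    · rw [ech]
      exact hilt
    · rw [w_kept .r13 rfl, (emode (mOf e) hm.1 hm.2).2]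
      exact hat.r13
    · rw [w_kept .r15 rfl]
      exact efloor _ hat.g
    · rw [w_kept .rbp rfl, c_rbp]
    · rw [w_kept .r12 rfl, efy i hi16]
      exact hat.r12
    · show s_1113fer.mem.readLE (e.reg .rsp - 3000 + 0x20) 8 = _
      rw [seg2b_slot20, q_fy, efy i hi16]
    · show s_1113fer.mem.readLE (e.reg .rsp - 3000 + 0x4c) 4 = 256 ∨ s_1113fer.mem.readLE (e.reg .rsp - 3000 + 0x4c) 4 = 128 ∨
        s_1113fer.mem.readLE (e.reg .rsp - 3000 + 0x4c) 4 = 86 ∨ s_1113fer.mem.readLE (e.reg .rsp - 3000 + 0x4c) 4 = 64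
      rw [seg2b_slot4c, q_rg]
      exact k_rg

end Vorbis.Spec.vorbis_decode_packet_rest_2b
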